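-- pv_equiv track=rewrite | github.com/Rick0317/entanglement_boson | tt_decomposition/state_tensor.py | base_4_to_num_elec
-- ===== SOURCE A (Python) =====
-- def base_4_to_num_elec(base_4_digits):
--     digit_list = base_4_digits.split(",")
--     sum_elec = 0
--     for digit in digit_list:
--         if digit == "1" or digit == "2":
--             sum_elec += 1
--         elif digit == "3":
--             sum_elec += 2
--
--     return sum_elec
-- ===== SOURCE B (Python) =====
-- def _token_contrib(tok_len, tok_char):
--     # electrons carried by a finished token: only single-char tokens '1','2','3' count
--     if tok_len == 1:
--         if tok_char == '1' or tok_char == '2':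
--             return 1
--         elif tok_char == '3':
--             return 2
--     return 0
--
--
-- def base_4_to_num_elec(base_4_digits):
--     # streaming character automaton: never builds the token list
--     total = 0
--     tok_len = 0
--     tok_char = None
--     for ch in base_4_digits:
--         if ch == ',':
--             total += _token_contrib(tok_len, tok_char)
--             tok_len = 0
--             tok_char = None
--         else:
--             tok_len += 1
--             tok_char = ch
--     return total + _token_contrib(tok_len, tok_char)
-- ===== Notes on version B (the rewrite author's own statement) =====
-- stated objective: alternative
-- what changed: Replaces split-then-loop-over-tokens with a single streaming character automaton that tracks only the current token's length and last character and flushes its contribution at each comma, never materialising the token list.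
import Mathlib
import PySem

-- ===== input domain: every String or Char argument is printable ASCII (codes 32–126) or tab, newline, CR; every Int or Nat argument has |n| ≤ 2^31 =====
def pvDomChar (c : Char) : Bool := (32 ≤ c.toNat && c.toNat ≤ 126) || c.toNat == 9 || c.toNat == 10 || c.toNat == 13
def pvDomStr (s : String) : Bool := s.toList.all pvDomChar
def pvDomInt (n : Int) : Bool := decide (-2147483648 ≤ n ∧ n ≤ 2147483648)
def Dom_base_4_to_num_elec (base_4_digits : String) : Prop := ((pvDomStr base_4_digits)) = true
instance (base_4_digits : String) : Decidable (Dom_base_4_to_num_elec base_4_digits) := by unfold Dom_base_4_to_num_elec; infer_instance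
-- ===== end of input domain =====

-- B replaces A's split-then-loop over tokens with a single streaming character automaton (no token list); return value equivalence, same cost.


-- ===== PORT A =====
-- A: split on ",", then the per-token branch-and-accumulate loop
def base_4_to_num_elec (base_4_digits : String) : Int :=
  let digit_list := (PySem.Str.split? base_4_digits ",").getD []  -- sep ≠ "" ⇒ always some
  digit_list.foldl
    (fun sum_elec digit =>
      if digit == "1" || digit == "2" then sum_elec + 1
      else if digit == "3" then sum_elec + 2
      else sum_elec) 0

-- ===== PORT B =====
-- B helper: electrons carried by a finished token (only single-char tokens '1','2','3' count)
def b4Contrib (tokLen : Nat) (tokChar : Option Char) : Int :=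
  if tokLen == 1 then
    match tokChar with
    | some c => if c == '1' || c == '2' then 1 else if c == '3' then 2 else 0
    | none => 0
  else 0

-- B loop: one pass over the characters, state = (total, current token length, its last char)
def b4Scan : List Char → Int → Nat → Option Char → Int
  | [], total, tokLen, tokChar => total + b4Contrib tokLen tokChar
  | ch :: rest, total, tokLen, tokChar =>
    if ch == ',' then b4Scan rest (total + b4Contrib tokLen tokChar) 0 none
    else b4Scan rest total (tokLen + 1) (some ch)

def base_4_to_num_elec_alt (base_4_digits : String) : Int :=
  b4Scan base_4_digits.toList 0 0 none

-- ===== PRECONDITION & SPEC =====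
def Spec_base_4_to_num_elec (base_4_digits : String) (out : Int) : Prop := out = base_4_to_num_elec_alt base_4_digits
instance (base_4_digits : String) (out : Int) : Decidable (Spec_base_4_to_num_elec base_4_digits out) := by unfold Spec_base_4_to_num_elec; infer_instance

-- ===== CLAIM (what is proved, stated in full; the proofs are below) =====
def Claim_equal_base_4_to_num_elec : Prop := ∀ (base_4_digits : String), Dom_base_4_to_num_elec base_4_digits → Spec_base_4_to_num_elec base_4_digits (base_4_to_num_elec base_4_digits)

-- ===== LEMMAS AND PROOFS =====

-- score of a token, on char lists
def b4Score (t : List Char) : Int :=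
  if t = ['1'] ∨ t = ['2'] then 1 else if t = ['3'] then 2 else 0

lemma b4Scan_total (l : List Char) (total : Int) (tokLen : Nat) (tokChar : Option Char) :
    b4Scan l total tokLen tokChar = total + b4Scan l 0 tokLen tokChar := by
  induction l generalizing total tokLen tokChar with
  | nil => simp [b4Scan]
  | cons c rest ih =>
    simp only [b4Scan]
    by_cases h : c = ','
    · simp only [h, beq_self_eq_true, if_true]
      rw [ih, ih (0 + b4Contrib tokLen tokChar)]
      ring
    · simp only [beq_iff_eq, h, if_false]
      rw [ih, ih 0]

lemma b4Score_len (t : List Char) (h : t.length ≠ 1) : b4Score t = 0 := by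
  unfold b4Score
  split_ifs with h1 h2
  · rcases h1 with h1 | h1 <;> subst h1 <;> simp at h
  · subst h2; simp at h
  · rfl

lemma b4Contrib_eq_score (cur : List Char) :
    b4Contrib cur.length cur.head? = b4Score cur.reverse := by
  match cur with
  | [] => simp [b4Contrib, b4Score]
  | [c] =>
    simp only [b4Contrib, b4Score, List.length_singleton, List.head?_cons,
      List.reverse_singleton]
    by_cases h1 : c = '1' <;> by_cases h2 : c = '2' <;> by_cases h3 : c = '3' <;>
      simp_all
  | c :: d :: tl =>
    have hs : b4Score (tl.reverse ++ [d, c]) = 0 := b4Score_len _ (by simp)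
    simp [b4Contrib, hs]

-- the central bridge: splitOn.go's token stream, scored and summed, is exactly B's scan
lemma go_score_sum (l : List Char) (fuel : Nat) (cur : List Char) (acc : List (List Char)) (hf : l.length ≤ fuel) :
    ((PySem.Chars.splitOn.go [','] fuel l cur acc).map b4Score).sum
      = (acc.map b4Score).sum + b4Scan l 0 cur.length cur.head? := by
  induction l generalizing fuel cur acc with
  | nil =>
    cases fuel with
    | zero =>
      simp [PySem.Chars.splitOn.go, b4Scan, b4Contrib_eq_score, List.sum_reverse, add_comm]
    | succ f =>
      simp [PySem.Chars.splitOn.go, b4Scan, b4Contrib_eq_score, List.sum_reverse, add_comm]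
  | cons c rest ih =>
    cases fuel with
    | zero => simp at hf
    | succ f =>
      have hrest : rest.length ≤ f := by simpa using hf
      by_cases hc : c = ','
      · have hpre : [','].isPrefixOf (c :: rest) = true := by
          simp [List.isPrefixOf, hc]
        simp only [PySem.Chars.splitOn.go, hpre, if_true]
        have : List.drop (List.length [',']) (c :: rest) = rest := by simp
        rw [this, ih f [] (cur.reverse :: acc) hrest]
        simp only [List.map_cons, List.sum_cons, b4Scan, hc]
        rw [b4Scan_total rest (0 + b4Contrib cur.length cur.head?)]
        simp [b4Contrib_eq_score, List.length_nil, List.head?_nil]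
        ring
      · have hpre : [','].isPrefixOf (c :: rest) = false := by
          simp only [List.isPrefixOf, Bool.and_eq_false_iff, beq_eq_false_iff_ne]
          exact Or.inl (fun he => hc he.symm)
        simp only [PySem.Chars.splitOn.go, hpre, Bool.false_eq_true, if_false]
        rw [ih f (c :: cur) acc hrest]
        simp [b4Scan, hc]

-- A's foldl over tokens is the summed score
lemma foldl_eq_score_sum (ts : List (List Char)) (a : Int) :
    (ts.map String.ofList).foldl
      (fun sum_elec digit =>
        if digit == "1" || digit == "2" then sum_elec + 1
        else if digit == "3" then sum_elec + 2
        else sum_elec) a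
    = a + (ts.map b4Score).sum := by
  induction ts generalizing a with
  | nil => simp
  | cons t ts ih =>
    simp only [List.map_cons, List.foldl_cons, ih, List.sum_cons]
    have e1 : (String.ofList t = "1") ↔ t = ['1'] :=
      ⟨fun h => by simpa using congrArg String.toList h, fun h => by subst h; rfl⟩
    have e2 : (String.ofList t = "2") ↔ t = ['2'] :=
      ⟨fun h => by simpa using congrArg String.toList h, fun h => by subst h; rfl⟩
    have e3 : (String.ofList t = "3") ↔ t = ['3'] :=
      ⟨fun h => by simpa using congrArg String.toList h, fun h => by subst h; rfl⟩
    unfold b4Score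
    by_cases h1 : t = ['1'] <;> by_cases h2 : t = ['2'] <;> by_cases h3 : t = ['3'] <;>
      simp [beq_iff_eq, e1, e2, e3, h1, h2, h3] <;> ring

-- ===== VERDICT (by name: the statement is the Claim_ definition above) =====
theorem base_4_to_num_elec_spec : Claim_equal_base_4_to_num_elec := by
  intro s _
  unfold Spec_base_4_to_num_elec base_4_to_num_elec base_4_to_num_elec_alt
  have hsplit : PySem.Str.split? s "," = some ((PySem.Chars.splitOn s.toList [',']).map String.ofList) := by
    simp [PySem.Str.split?, PySem.Chars.split?]
  rw [hsplit]
  simp only [Option.getD_some, foldl_eq_score_sum, zero_add]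
  have := go_score_sum s.toList (s.toList.length + 1) [] [] (by omega)
  simpa [PySem.Chars.splitOn] using this
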